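-- pv_equiv track=rewrite | github.com/bsumser/AOC | 2017/day4.py | part2_helper
-- ===== SOURCE A (Python) =====
-- def part2_helper(line):
--     for i in range(0, len(line)):
--         for j in range(1, len(line)):
--             word1 = line[i]
--             word2 = line[j]
--             if (i == j):
--                 break
--             if (set(word1) == set(word2)):
--                 return False
--     return True
-- ===== SOURCE B (Python) =====
-- def part2_helper(line):
--     keys = sorted(''.join(sorted(set(w))) for w in line)
--     return all(a != b for a, b in zip(keys, keys[1:]))
-- ===== Notes on version B (the rewrite author's own statement) =====
-- stated objective: alternative
-- what changed: Replaces the all-pairs set(word1)==set(word2) comparisons with a canonical sorted-distinct-characters key per word, one sort of the key list, and a single adjacent-duplicate scan.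
import Mathlib
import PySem

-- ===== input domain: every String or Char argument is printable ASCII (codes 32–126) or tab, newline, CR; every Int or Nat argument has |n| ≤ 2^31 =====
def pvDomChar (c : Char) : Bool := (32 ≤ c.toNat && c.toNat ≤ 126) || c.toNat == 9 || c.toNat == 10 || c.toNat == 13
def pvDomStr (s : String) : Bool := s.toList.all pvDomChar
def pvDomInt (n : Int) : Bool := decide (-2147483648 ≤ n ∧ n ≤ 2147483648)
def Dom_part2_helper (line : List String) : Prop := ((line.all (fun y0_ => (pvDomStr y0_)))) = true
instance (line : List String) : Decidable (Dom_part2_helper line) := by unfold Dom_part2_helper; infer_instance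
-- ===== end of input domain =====

-- B replaces A's all-pairs set(word1)==set(word2) comparisons by one sort of per-word
-- canonical keys followed by a single adjacent-duplicate scan (objective: alternative).

-- ===== PORT A =====
-- inner 'for j in range(1, len(line))' loop: true = loop completed (or broke), false = 'return False'
def partA_inner (line : List String) (i : Int) : List Int → Bool
  | [] => true
  | j :: js =>
    let word1 := PySem.List.pyGetD line i ""   -- line[i]; i is always in range here
    let word2 := PySem.List.pyGetD line j ""   -- line[j]; j is always in range here
    if i == j then true                        -- break
    else if PySem.Set.equal (PySem.Set.ofList word1.toList) (PySem.Set.ofList word2.toList) then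
      false                                    -- return False
    else partA_inner line i js

-- outer 'for i in range(0, len(line))' loop
def partA_outer (line : List String) : List Int → Bool
  | [] => true
  | i :: is =>
    if partA_inner line i (PySem.List.pyRange 1 (line.length : Int) 1) then partA_outer line is
    else false

def part2_helper (line : List String) : Bool :=
  partA_outer line (PySem.List.pyRange 0 (line.length : Int) 1)

-- ===== PORT B =====
-- ''.join(sorted(set(w))) — the canonical key, kept as its list of characters
def pvKey (w : String) : List Char :=
  PySem.List.sorted (PySem.Set.ofList w.toList) (fun c => c) false

def part2_helper_alt (line : List String) : Bool :=
  let keys := PySem.List.sorted (line.map pvKey) (fun k => k) false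
  (keys.zip keys.tail).all (fun p => p.1 != p.2)

-- ===== PRECONDITION & SPEC =====
def Spec_part2_helper (line : List String) (out : Bool) : Prop := out = part2_helper_alt line
instance (line : List String) (out : Bool) : Decidable (Spec_part2_helper line out) := by unfold Spec_part2_helper; infer_instance

-- ===== CLAIM (what is proved, stated in full; the proofs are below) =====
def Claim_equal_part2_helper : Prop := ∀ (line : List String), Dom_part2_helper line → Spec_part2_helper line (part2_helper line)

-- ===== LEMMAS AND PROOFS =====

-- the outer loop succeeds iff every iteration's inner loop does
theorem partA_outer_true_iff (line : List String) (is : List Int) :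
    partA_outer line is = true ↔
      ∀ i ∈ is, partA_inner line i (PySem.List.pyRange 1 (line.length : Int) 1) = true := by
  induction is with
  | nil => simp [partA_outer]
  | cons i is ih =>
    simp only [partA_outer, List.mem_cons]
    split_ifs with h <;> simp_all

-- inner loop that never hits the break: a pure scan
theorem partA_inner_scan (line : List String) (i : Int) (js : List Int) (h : i ∉ js) :
    partA_inner line i js = true ↔
      ∀ j ∈ js, ¬ (PySem.Set.equal (PySem.Set.ofList (PySem.List.pyGetD line i "").toList)
          (PySem.Set.ofList (PySem.List.pyGetD line j "").toList) = true) := by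
  induction js with
  | nil => simp [partA_inner]
  | cons j js ih =>
    simp only [List.mem_cons, not_or] at h
    simp only [partA_inner, List.mem_cons]
    have hij : (i == j) = false := by simpa using h.1
    rw [hij]
    simp only [Bool.false_eq_true, if_false]
    split_ifs with he <;> simp_all

-- the break at j = i cuts the scan short
theorem partA_inner_break (line : List String) (i : Int) (js rest : List Int) (h : i ∉ js) :
    partA_inner line i (js ++ i :: rest) = partA_inner line i js := by
  induction js with
  | nil => simp [partA_inner]
  | cons j js ih =>
    simp only [List.mem_cons, not_or] at h
    have hij : (i == j) = false := by simpa using h.1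
    simp only [List.cons_append, partA_inner, hij]
    rw [ih h.2]

-- the sorted-by-identity call of pvKey, re-typed with Mathlib's LinearOrder instances
-- (the LT instances are definitionally equal; the Decidable instances are propositionally so)
theorem sorted_instC (xs : List Char) :
    PySem.List.sorted xs (fun c => c) false
      = @PySem.List.sorted _ _ (inferInstance : LinearOrder Char).toLT
          LinearOrder.toDecidableLT xs (fun c => c) false := by
  congr 1

theorem pvKey_pairwise (w : String) : (pvKey w).Pairwise (· < ·) := by
  rw [pvKey, sorted_instC]
  exact PySem.List.sorted_ofList_pairwise_lt _

theorem pvKey_mem (w : String) (x : Char) : x ∈ pvKey w ↔ x ∈ PySem.Set.ofList w.toList := by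
  rw [pvKey]; exact PySem.List.mem_sorted _ _ _ x

-- two word sets are equal iff the canonical keys coincide
theorem pvKey_eq_iff (w1 w2 : String) :
    pvKey w1 = pvKey w2 ↔
      PySem.Set.equal (PySem.Set.ofList w1.toList) (PySem.Set.ofList w2.toList) = true := by
  rw [PySem.Set.equal_iff]
  constructor
  · intro h x
    rw [← pvKey_mem, ← pvKey_mem, h]
  · intro h
    have h1 := pvKey_pairwise w1
    have h2 := pvKey_pairwise w2
    have hperm : (pvKey w1).Perm (pvKey w2) := by
      rw [List.perm_ext_iff_of_nodup (h1.imp ne_of_lt) (h2.imp ne_of_lt)]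
      intro x
      rw [pvKey_mem, pvKey_mem]
      exact h x
    exact PySem.List.eq_of_perm_of_pairwise_le_of_injective (fun x => x) (fun a b h => h) hperm
      (h1.imp le_of_lt) (h2.imp le_of_lt)

-- the indices the inner loop for iteration i actually checks
def pvChecked (n i : Int) : List Int :=
  if i = 0 then PySem.List.pyRange 1 n 1 else PySem.List.pyRange 1 i 1

theorem partA_inner_iff (line : List String) (i : Int) (h0 : 0 ≤ i) (hn : i < (line.length : Int)) :
    partA_inner line i (PySem.List.pyRange 1 (line.length : Int) 1) = true ↔
      ∀ j ∈ pvChecked (line.length : Int) i,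
        ¬ (PySem.Set.equal (PySem.Set.ofList (PySem.List.pyGetD line i "").toList)
            (PySem.Set.ofList (PySem.List.pyGetD line j "").toList) = true) := by
  unfold pvChecked
  split_ifs with hi
  · subst hi
    exact partA_inner_scan line 0 _ (by simp [PySem.List.mem_pyRange_one])
  · have h1 : (1:Int) ≤ i := by omega
    have hsplit := PySem.List.pyRange_one_append 1 i (line.length : Int) h1 (le_of_lt hn)
    have hcons := PySem.List.pyRange_one_cons hn
    have hnm : i ∉ PySem.List.pyRange 1 i 1 := by simp [PySem.List.mem_pyRange_one]
    rw [hsplit, hcons, partA_inner_break line i _ _ hnm]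
    exact partA_inner_scan line i _ hnm

-- A returns true iff the canonical keys are pairwise distinct
theorem partA_true_iff (line : List String) :
    part2_helper line = true ↔ (line.map pvKey).Nodup := by
  rw [part2_helper, partA_outer_true_iff, List.Nodup, List.pairwise_iff_getElem]
  have hget : ∀ (k : Nat) (hk : k < line.length),
      PySem.List.pyGetD line (k : Int) "" = (line)[k] := by
    intro k hk
    simp [PySem.List.pyGetD_natCast, List.getElem?_eq_getElem hk]
  constructor
  · intro hA p q hp hq hpq
    simp only [List.length_map] at hp hq
    simp only [List.getElem_map]
    intro heq
    by_cases hp0 : p = 0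
    · subst hp0
      have h := (partA_inner_iff line 0 le_rfl (by exact_mod_cast by omega)).mp
        (hA 0 (by rw [PySem.List.mem_pyRange_one]; omega)) (q : Int)
        (by rw [pvChecked, if_pos rfl, PySem.List.mem_pyRange_one]; omega)
      rw [show ((0:Int)) = ((0:Nat):Int) from rfl, hget 0 (by omega), hget q hq] at h
      exact h ((pvKey_eq_iff _ _).mp heq)
    · have h := (partA_inner_iff line q (by omega) (by exact_mod_cast hq)).mp
        (hA q (by rw [PySem.List.mem_pyRange_one]; omega)) (p : Int)
        (by have hq0 : ¬((q:Int)) = 0 := by omega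
            rw [pvChecked, if_neg hq0, PySem.List.mem_pyRange_one]
            omega)
      rw [hget q hq, hget p hp] at h
      exact h ((pvKey_eq_iff _ _).mp heq.symm)
  · intro hN i hi
    rw [PySem.List.mem_pyRange_one] at hi
    obtain ⟨iN, rfl⟩ : ∃ m : Nat, i = (m : Int) := ⟨i.toNat, by omega⟩
    have hiN : iN < line.length := by exact_mod_cast hi.2
    rw [partA_inner_iff line iN (by omega) (by exact_mod_cast hiN)]
    intro j hj heq
    have hjb : 1 ≤ j ∧ j < (line.length : Int) ∧ ((iN : Int) = 0 ∨ j < iN) := by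
      by_cases hi0 : (iN : Int) = 0
      · rw [pvChecked, if_pos hi0, PySem.List.mem_pyRange_one] at hj
        exact ⟨by omega, by omega, Or.inl hi0⟩
      · rw [pvChecked, if_neg hi0, PySem.List.mem_pyRange_one] at hj
        exact ⟨by omega, by omega, Or.inr (by omega)⟩
    obtain ⟨jN, rfl⟩ : ∃ m : Nat, j = (m : Int) := ⟨j.toNat, by omega⟩
    have hjN : jN < line.length := by exact_mod_cast hjb.2.1
    rw [hget iN hiN, hget jN hjN] at heq
    have hkey := (pvKey_eq_iff _ _).mpr heq
    rcases hjb.2.2 with hi0 | hji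
    · have hiN0 : iN = 0 := by exact_mod_cast hi0
      subst hiN0
      have := hN 0 jN (by simp; omega) (by simpa using hjN) (by omega)
      simp only [List.getElem_map] at this
      exact this hkey
    · have := hN jN iN (by simpa using hjN) (by simpa using hiN) (by exact_mod_cast hji)
      simp only [List.getElem_map] at this
      exact this hkey.symm

-- B's sort, re-typed with Mathlib's LinearOrder instances (same LT; Decidable is a subsingleton)
theorem sorted_instL (xs : List (List Char)) :
    PySem.List.sorted xs (fun k => k) false
      = @PySem.List.sorted _ _ (inferInstance : LinearOrder (List Char)).toLT
          LinearOrder.toDecidableLT xs (fun k => k) false := by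
  congr 1

-- on a ≤-sorted list, no adjacent duplicates iff no duplicates at all
theorem adj_nodup (l : List (List Char)) (h : l.Pairwise (· ≤ ·)) :
    ((l.zip l.tail).all (fun p => p.1 != p.2) = true) ↔ l.Nodup := by
  induction l with
  | nil => simp
  | cons a l ih =>
    cases l with
    | nil => simp
    | cons b t =>
      have hab : a ≤ b := (List.pairwise_cons.mp h).1 b (by simp)
      have ht := (List.pairwise_cons.mp h).2
      have hbt : ∀ x ∈ t, b ≤ x := (List.pairwise_cons.mp ht).1
      simp only [List.tail_cons, List.zip_cons_cons, List.all_cons, Bool.and_eq_true, bne_iff_ne, ne_eq]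
      rw [show ((b :: t).zip t) = ((b :: t).zip (b :: t).tail) from rfl, ih ht]
      constructor
      · rintro ⟨hne, hnd⟩
        refine List.nodup_cons.mpr ⟨?_, hnd⟩
        simp only [List.mem_cons, not_or]
        refine ⟨hne, fun hmem => ?_⟩
        exact hne (le_antisymm hab (hbt a hmem))
      · intro hnd
        have := List.nodup_cons.mp hnd
        exact ⟨fun hab' => this.1 (hab' ▸ List.mem_cons_self), this.2⟩

-- B returns true iff the canonical keys are pairwise distinct
theorem partB_true_iff (line : List String) :
    part2_helper_alt line = true ↔ (line.map pvKey).Nodup := by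
  unfold part2_helper_alt
  rw [sorted_instL, adj_nodup _ (PySem.List.sorted_pairwise _ _)]
  have hp := PySem.List.sorted_perm (line.map pvKey) (fun k => k) false
  rw [sorted_instL] at hp
  exact hp.nodup_iff

-- ===== VERDICT (by name: the statement is the Claim_ definition above) =====
theorem part2_helper_spec : Claim_equal_part2_helper := by
  intro line _
  unfold Spec_part2_helper
  rw [Bool.eq_iff_iff, partA_true_iff, partB_true_iff]
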